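-- pv_equiv track=rewrite | github.com/Dheebz/advent-of-code | src/python/year_2016/solution_2016_day_08.py | apply
-- ===== SOURCE A (Python) =====
-- from typing import Dict, Iterable, List, Tuple
--
-- Command = Tuple[str, Tuple[int, int]]
--
-- def apply(commands: Iterable[Command], width: int = 50, height: int = 6) -> List[List[bool]]:
--     """Execute commands and return the resulting screen."""
--     screen = [[False for _ in range(width)] for _ in range(height)]
--     for kind, (a, b) in commands:
--         if kind == "rect":
--             w, h = a, b
--             for y in range(h):
--                 for x in range(w):
--                     screen[y][x] = True
--         elif kind == "row":
--             y, shift = a, b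
--             shift %= width
--             screen[y] = screen[y][-shift:] + screen[y][:-shift]
--         elif kind == "col":
--             x, shift = a, b
--             shift %= height
--             column = [screen[y][x] for y in range(height)]
--             column = column[-shift:] + column[:-shift]
--             for y in range(height):
--                 screen[y][x] = column[y]
--     return screen
-- ===== SOURCE B (Python) =====
-- def apply(commands, width=50, height=6):
--     """Execute commands and return the resulting screen."""
--     lit = set()
--     for kind, (a, b) in commands:
--         if kind == "rect":
--             lit |= {(x, y) for y in range(b) for x in range(a)}
--         elif kind == "row":
--             y0 = a % height
--             s = b % width
--             lit = {((x + s) % width, y) if y == y0 else (x, y) for (x, y) in lit}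
--         elif kind == "col":
--             x0 = a % width
--             s = b % height
--             lit = {(x, (y + s) % height) if x == x0 else (x, y) for (x, y) in lit}
--     screen = [[False] * width for _ in range(height)]
--     for x, y in lit:
--         screen[y][x] = True
--     return screen
-- ===== Notes on version B (the rewrite author's own statement) =====
-- stated objective: alternative
-- what changed: B tracks the screen as a set of lit (x,y) coordinates (rect adds a block of coordinates, row/col rotations remap the coordinates on one line by modular arithmetic) instead of A's in-place mutation of a 2D boolean list with slice concatenation, and renders the boolean grid only at the end.
-- outside the precondition, e.g. on apply([('col', (0, 1))], 0, -1): A returns [], B raises ZeroDivisionError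
import Mathlib
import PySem

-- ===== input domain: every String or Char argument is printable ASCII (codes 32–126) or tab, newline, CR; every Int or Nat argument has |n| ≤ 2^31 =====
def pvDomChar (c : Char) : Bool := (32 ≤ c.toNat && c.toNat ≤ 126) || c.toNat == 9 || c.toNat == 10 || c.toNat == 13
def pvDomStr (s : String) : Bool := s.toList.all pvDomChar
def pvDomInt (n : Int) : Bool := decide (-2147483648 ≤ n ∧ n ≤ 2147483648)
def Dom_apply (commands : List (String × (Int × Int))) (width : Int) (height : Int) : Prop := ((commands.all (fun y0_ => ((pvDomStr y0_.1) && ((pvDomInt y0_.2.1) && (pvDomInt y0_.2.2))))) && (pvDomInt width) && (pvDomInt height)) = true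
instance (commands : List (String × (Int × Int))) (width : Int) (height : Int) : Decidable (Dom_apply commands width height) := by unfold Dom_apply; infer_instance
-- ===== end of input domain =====

-- B keeps the lit pixels as a set of (x, y) coordinates instead of mutating a 2D list;
-- objective: alternative (a different data structure; the return value is proved equal, A mutates nothing observable).

-- ===== PORT A =====
-- one command step of A's loop body (kept as a helper for readability; branches in Python order)
def applyStepA (width height : Int) (screen : List (List Bool)) (cmd : String × (Int × Int)) : List (List Bool) :=
  if cmd.1 == "rect" then
    -- for y in range(h): for x in range(w): screen[y][x] = True
    (PySem.List.pyRange 0 cmd.2.2 1).foldl (fun screen y =>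
      (PySem.List.pyRange 0 cmd.2.1 1).foldl (fun screen x =>
        PySem.List.pySetD screen y (PySem.List.pySetD (PySem.List.pyGetD screen y []) x true)) screen) screen
  else if cmd.1 == "row" then
    -- shift %= width; screen[y] = screen[y][-shift:] + screen[y][:-shift]
    let shift := PySem.Int.mod cmd.2.2 width
    let row := PySem.List.pyGetD screen cmd.2.1 []
    PySem.List.pySetD screen cmd.2.1
      (PySem.List.slice row (some (-shift)) none ++ PySem.List.slice row none (some (-shift)))
  else if cmd.1 == "col" then
    -- shift %= height; column = [screen[y][x] for y in range(height)]; rotate; write back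
    let shift := PySem.Int.mod cmd.2.2 height
    let column := (PySem.List.pyRange 0 height 1).map
      (fun y => PySem.List.pyGetD (PySem.List.pyGetD screen y []) cmd.2.1 false)
    let column := PySem.List.slice column (some (-shift)) none ++ PySem.List.slice column none (some (-shift))
    (PySem.List.pyRange 0 height 1).foldl (fun screen y =>
      PySem.List.pySetD screen y
        (PySem.List.pySetD (PySem.List.pyGetD screen y []) cmd.2.1 (PySem.List.pyGetD column y false))) screen
  else screen

def apply (commands : List (String × (Int × Int))) (width : Int) (height : Int) : List (List Bool) :=
  let screen := (PySem.List.pyRange 0 height 1).map (fun _ => (PySem.List.pyRange 0 width 1).map (fun _ => false))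
  commands.foldl (applyStepA width height) screen

-- ===== PORT B =====
-- one command step of B's loop body
def applyStepB (width height : Int) (lit : PySem.Set (Int × Int)) (cmd : String × (Int × Int)) : PySem.Set (Int × Int) :=
  if cmd.1 == "rect" then
    -- lit |= {(x, y) for y in range(b) for x in range(a)}
    PySem.Set.union lit ((PySem.List.pyRange 0 cmd.2.2 1).flatMap
      (fun y => (PySem.List.pyRange 0 cmd.2.1 1).map (fun x => (x, y))))
  else if cmd.1 == "row" then
    -- y0 = a % height; s = b % width; rotate the coordinates on row y0
    let y0 := PySem.Int.mod cmd.2.1 height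
    let s := PySem.Int.mod cmd.2.2 width
    PySem.Set.ofList (lit.map (fun p => if p.2 == y0 then (PySem.Int.mod (p.1 + s) width, p.2) else p))
  else if cmd.1 == "col" then
    -- x0 = a % width; s = b % height; rotate the coordinates on column x0
    let x0 := PySem.Int.mod cmd.2.1 width
    let s := PySem.Int.mod cmd.2.2 height
    PySem.Set.ofList (lit.map (fun p => if p.1 == x0 then (p.1, PySem.Int.mod (p.2 + s) height) else p))
  else lit

def apply_alt (commands : List (String × (Int × Int))) (width : Int) (height : Int) : List (List Bool) :=
  let lit := commands.foldl (applyStepB width height) PySem.Set.empty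
  -- screen = [[False] * width for _ in range(height)]; for x, y in lit: screen[y][x] = True
  -- (the iteration order over the set does not matter: distinct cells are each set to True)
  let screen := (PySem.List.pyRange 0 height 1).map (fun _ => PySem.List.pyRepeat [false] width)
  lit.foldl (fun s p =>
    PySem.List.pySetD s p.2 (PySem.List.pySetD (PySem.List.pyGetD s p.2 []) p.1 true)) screen

-- ===== PRECONDITION & SPEC =====
-- Pre_ excludes exactly the inputs where A raises (IndexError / ZeroDivisionError) plus the single
-- degenerate corner 'col command with height < 0 and width = 0', where A returns [] and B itself
-- raises ZeroDivisionError (a % width).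
def Pre_apply (commands : List (String × (Int × Int))) (width : Int) (height : Int) : Prop :=
  ∀ c ∈ commands,
    (c.1 = "rect" → (0 < c.2.1 ∧ 0 < c.2.2 → c.2.1 ≤ width ∧ c.2.2 ≤ height)) ∧
    (c.1 = "row" → width ≠ 0 ∧ 0 < height ∧ -height ≤ c.2.1 ∧ c.2.1 < height) ∧
    (c.1 = "col" → height ≠ 0 ∧ width ≠ 0 ∧ (0 < height → 0 < width ∧ -width ≤ c.2.1 ∧ c.2.1 < width))
instance (commands : List (String × (Int × Int))) (width : Int) (height : Int) : Decidable (Pre_apply commands width height) := by unfold Pre_apply; infer_instance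

def pvWitness_apply : (List (String × (Int × Int))) × Int × Int :=
  ([("rect", (2, 1)), ("row", (0, 1)), ("col", (1, 2))], 3, 2)

def Spec_apply (commands : List (String × (Int × Int))) (width : Int) (height : Int) (out : List (List Bool)) : Prop := out = apply_alt commands width height
instance (commands : List (String × (Int × Int))) (width : Int) (height : Int) (out : List (List Bool)) : Decidable (Spec_apply commands width height out) := by unfold Spec_apply; infer_instance

-- ===== CLAIM (what is proved, stated in full; the proofs are below) =====
def Claim_equal_apply : Prop := ∀ (commands : List (String × (Int × Int))) (width : Int) (height : Int), Dom_apply commands width height → Pre_apply commands width height → Spec_apply commands width height (apply commands width height)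

-- ===== LEMMAS AND PROOFS =====

-- abstract pixel function that both programs track, advanced one command at a time
def pvStepF (W H : Int) (F : Int → Int → Bool) (c : String × (Int × Int)) : Int → Int → Bool :=
  if c.1 == "rect" then
    fun x y => if x < c.2.1 ∧ y < c.2.2 then true else F x y
  else if c.1 == "row" then
    fun x y => if y = PySem.Int.mod c.2.1 H then F (PySem.Int.mod (x - PySem.Int.mod c.2.2 W) W) y else F x y
  else if c.1 == "col" then
    fun x y => if x = PySem.Int.mod c.2.1 W then F x (PySem.Int.mod (y - PySem.Int.mod c.2.2 H) H) else F x y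
  else F

-- A's screen realises F on the grid
def pvARel (W H : Int) (screen : List (List Bool)) (F : Int → Int → Bool) : Prop :=
  screen.length = H.toNat ∧ (∀ r ∈ screen, r.length = W.toNat) ∧
    ∀ j i : Nat, j < W.toNat → i < H.toNat → (screen.getD i []).getD j false = F j i

-- B's lit set realises F on the grid and stays inside it
def pvBRel (W H : Int) (lit : List (Int × Int)) (F : Int → Int → Bool) : Prop :=
  (∀ p ∈ lit, 0 ≤ p.1 ∧ p.1 < W ∧ 0 ≤ p.2 ∧ p.2 < H) ∧
    ∀ j i : Nat, j < W.toNat → i < H.toNat → decide (((j : Int), (i : Int)) ∈ lit) = F j i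

-- the per-command precondition (the body of Pre_apply)
def pvPreC (W H : Int) (c : String × (Int × Int)) : Prop :=
  (c.1 = "rect" → (0 < c.2.1 ∧ 0 < c.2.2 → c.2.1 ≤ W ∧ c.2.2 ≤ H)) ∧
  (c.1 = "row" → W ≠ 0 ∧ 0 < H ∧ -H ≤ c.2.1 ∧ c.2.1 < H) ∧
  (c.1 = "col" → H ≠ 0 ∧ W ≠ 0 ∧ (0 < H → 0 < W ∧ -W ≤ c.2.1 ∧ c.2.1 < W))

lemma pv_getD_set {α : Type} (l : List α) (n j : Nat) (v d : α) :
    (l.set n v).getD j d = if j = n ∧ j < l.length then v else l.getD j d := by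
  rcases Nat.lt_or_ge j l.length with hj | hj
  · by_cases hjn : j = n
    · subst hjn; simp [List.getD_eq_getElem?_getD, hj]
    · simp [List.getD_eq_getElem?_getD, hjn, Ne.symm hjn]
  · have h1 : (l.set n v)[j]? = none := by
      rw [List.getElem?_eq_none_iff]; simpa using hj
    have h2 : l[j]? = none := by rw [List.getElem?_eq_none_iff]; exact hj
    rw [List.getD_eq_getElem?_getD, List.getD_eq_getElem?_getD, h1, h2]
    have : ¬(j = n ∧ j < l.length) := by omega
    simp [this]

lemma pv_mod_inrange {x W : Int} (h0 : 0 ≤ x) (h1 : x < W) : PySem.Int.mod x W = x := by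
  rw [PySem.Int.mod_eq_emod_of_pos (by omega)]; exact Int.emod_eq_of_lt h0 h1

lemma pv_mod_neg {x W : Int} (hW : 0 < W) (h0 : -W ≤ x) (h1 : x < 0) :
    PySem.Int.mod x W = x + W := by
  rw [PySem.Int.mod_eq_emod_of_pos hW]
  have h2 : (x + W) % W = x % W := Int.add_emod_right x W
  have h3 : (x + W) % W = x + W := Int.emod_eq_of_lt (by omega) (by omega)
  omega

-- rotation inversion: (p + s) % W = j  ↔  p = (j - s) % W, for p, j in [0, W)
lemma pv_mod_shift_iff {W p j s : Int} (hW : 0 < W) (hp0 : 0 ≤ p) (hp1 : p < W)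
    (hj0 : 0 ≤ j) (hj1 : j < W) :
    PySem.Int.mod (p + s) W = j ↔ p = PySem.Int.mod (j - s) W := by
  rw [PySem.Int.mod_eq_emod_of_pos hW, PySem.Int.mod_eq_emod_of_pos hW]
  have hjW : j % W = j := Int.emod_eq_of_lt hj0 hj1
  have hpW : p % W = p := Int.emod_eq_of_lt hp0 hp1
  constructor
  · intro h
    have e2 : (j - s) % W = (j % W - s % W) % W := Int.sub_emod _ _ _
    have e1 : (p + s - s) % W = ((p + s) % W - s % W) % W := Int.sub_emod _ _ _
    have e3 : p + s - s = p := by ring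
    rw [e2, hjW, ← h, ← Int.sub_emod, e3, hpW]
  · intro h
    have e1 : ((j - s) % W + s) % W = ((j - s) + s) % W := by
      rw [Int.add_emod, Int.emod_emod_of_dvd _ dvd_rfl, ← Int.add_emod]
    have e2 : j - s + s = j := by ring
    rw [h, e1, e2, hjW]

lemma pv_pyGetD_in {α : Type} (xs : List α) (i : Int) (d : α)
    (h0 : -(xs.length : Int) ≤ i) (h1 : i < (xs.length : Int)) :
    PySem.List.pyGetD xs i d = xs.getD (PySem.Int.mod i xs.length).toNat d := by
  have hlen : 0 < (xs.length : Int) := by omega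
  rcases le_or_gt 0 i with hi | hi
  · rw [pv_mod_inrange hi h1, PySem.List.pyGetD_eq_getElem xs d hi h1,
      List.getD_eq_getElem _ _ (by omega)]
  · have hk : i = -(((-i).toNat : Nat) : Int) := by omega
    rw [hk, PySem.List.pyGetD_neg_natCast xs (-i).toNat d (by omega) (by omega),
      pv_mod_neg hlen (by omega) (by omega)]
    rw [List.getD_eq_getElem _ _ (by omega)]
    congr 1
    omega

lemma pv_pySetD_in {α : Type} (xs : List α) (i : Int) (v : α)
    (h0 : -(xs.length : Int) ≤ i) (h1 : i < (xs.length : Int)) :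
    PySem.List.pySetD xs i v = xs.set (PySem.Int.mod i xs.length).toNat v := by
  have hlen : 0 < (xs.length : Int) := by omega
  rcases le_or_gt 0 i with hi | hi
  · rw [PySem.List.pySetD_of_nonneg xs v hi, pv_mod_inrange hi h1]
  · rw [pv_mod_neg hlen (by omega) (by omega)]
    simp only [PySem.List.pySetD, PySem.List.pySet?, PySem.List.pyIdx?, if_neg (by omega : ¬ 0 ≤ i),
      if_pos (by omega : -(xs.length : Int) ≤ i), Option.map_some, Option.getD_some]
    congr 1
    omega

-- the two slices A concatenates, on the empty row
lemma pv_rot_nil {α : Type} (sh : Int) :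
    PySem.List.slice ([] : List α) (some (-sh)) none ++ PySem.List.slice ([] : List α) none (some (-sh)) = [] := by
  rw [PySem.List.slice_some_none]
  rcases le_or_gt 0 (-sh) with h | h
  · rw [PySem.List.slice_to _ h]; simp
  · have hk : -sh = -(((sh.toNat) : Nat) : Int) := by omega
    rw [hk, PySem.List.slice_to_neg_natCast _ _ (by omega)]; simp

lemma pv_rot_length {α : Type} (l : List α) (sh : Int) (h0 : 0 ≤ sh) (h1 : sh < (l.length : Int)) :
    (PySem.List.slice l (some (-sh)) none ++ PySem.List.slice l none (some (-sh))).length = l.length := by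
  rcases eq_or_lt_of_le h0 with h | h
  · subst h
    simp [PySem.List.slice_zero_start, PySem.List.slice_none_none, PySem.List.slice_to _ (le_refl (0 : Int))]
  · have hk : -sh = -((sh.toNat : Nat) : Int) := by omega
    rw [hk, PySem.List.slice_from_neg_natCast _ _ (by omega), PySem.List.slice_to_neg_natCast _ _ (by omega)]
    simp

lemma pv_rot_getD (l : List Bool) (W : Int) (hW : 0 < W) (hlen : l.length = W.toNat)
    (sh : Int) (h0 : 0 ≤ sh) (h1 : sh < W) (j : Nat) (hj : j < W.toNat) :
    (PySem.List.slice l (some (-sh)) none ++ PySem.List.slice l none (some (-sh))).getD j false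
      = l.getD (PySem.Int.mod ((j : Int) - sh) W).toNat false := by
  rcases eq_or_lt_of_le h0 with h | h
  · subst h
    simp only [neg_zero, sub_zero]
    rw [PySem.List.slice_zero_start, PySem.List.slice_none_none, PySem.List.slice_to _ (le_refl (0 : Int))]
    simp only [Int.toNat_zero, List.take_zero, List.append_nil]
    rw [pv_mod_inrange (by omega) (by omega)]
    simp
  · have hk : -sh = -((sh.toNat : Nat) : Int) := by omega
    rw [hk, PySem.List.slice_from_neg_natCast _ _ (by omega), PySem.List.slice_to_neg_natCast _ _ (by omega)]
    have hdl : (l.drop (l.length - sh.toNat)).length = sh.toNat := by simp; omega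
    rcases Nat.lt_or_ge j sh.toNat with hcase | hcase
    · rw [List.getD_eq_getElem?_getD, List.getElem?_append_left (by rw [hdl]; exact hcase),
        List.getElem?_drop, pv_mod_neg hW (by omega) (by omega), List.getD_eq_getElem?_getD]
      have hidx : l.length - sh.toNat + j = (((j : Int) - sh) + W).toNat := by omega
      rw [hidx]
    · rw [List.getD_eq_getElem?_getD, List.getElem?_append_right (by rw [hdl]; exact hcase), hdl,
        List.getElem?_take_of_lt (by omega), pv_mod_inrange (by omega) (by omega),
        List.getD_eq_getElem?_getD]
      have hidx : j - sh.toNat = ((j : Int) - sh).toNat := by omega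
      rw [hidx]

-- the row [0,m) prefix of a row set to True (A's inner rect loop on one row)
def pvFillRow (r : List Bool) (m : Nat) : List Bool :=
  (List.range m).foldl (fun r k => r.set k true) r

lemma pvFillRow_succ (r : List Bool) (m : Nat) :
    pvFillRow r (m + 1) = (pvFillRow r m).set m true := by
  simp [pvFillRow, List.range_succ]

lemma pvFillRow_length (r : List Bool) (m : Nat) : (pvFillRow r m).length = r.length := by
  induction m with
  | zero => rfl
  | succ m ih => rw [pvFillRow_succ, List.length_set, ih]

lemma pvFillRow_getD (r : List Bool) (m : Nat) (hm : m ≤ r.length) (j : Nat) :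
    (pvFillRow r m).getD j false = if j < m then true else r.getD j false := by
  induction m with
  | zero => simp [pvFillRow]
  | succ m ih =>
    rw [pvFillRow_succ, pv_getD_set, pvFillRow_length, ih (by omega)]
    split_ifs <;> first | rfl | omega

-- A's inner rect loop: writes the fill of row y back at index y
lemma pv_rect_inner (screen : List (List Bool)) (y : Nat) (hy : y < screen.length) (m : Nat) :
    (List.range m).foldl
      (fun s x => PySem.List.pySetD s ((y : Nat) : Int)
        (PySem.List.pySetD (PySem.List.pyGetD s ((y : Nat) : Int) []) ((x : Nat) : Int) true)) screen
    = screen.set y (pvFillRow (screen.getD y []) m) := by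
  induction m with
  | zero =>
    show screen = _
    rw [pvFillRow, List.range_zero, List.foldl_nil,
      List.getD_eq_getElem _ _ hy, List.set_getElem_self]
  | succ m ih =>
    rw [List.range_succ, List.foldl_append, List.foldl_cons, List.foldl_nil, ih]
    rw [PySem.List.pyGetD_natCast, PySem.List.pySetD_natCast, PySem.List.pySetD_natCast]
    rw [pv_getD_set, if_pos ⟨rfl, by simpa using hy⟩, List.set_set, pvFillRow_succ]

-- A's full rect loop, pointwise
lemma pv_rect_outer (screen : List (List Bool)) (aN m : Nat) (hm : m ≤ screen.length) :
    ((List.range m).foldl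
      (fun s y => (List.range aN).foldl
        (fun s x => PySem.List.pySetD s ((y : Nat) : Int)
          (PySem.List.pySetD (PySem.List.pyGetD s ((y : Nat) : Int) []) ((x : Nat) : Int) true)) s)
      screen).length = screen.length ∧
    ∀ i : Nat, ((List.range m).foldl
      (fun s y => (List.range aN).foldl
        (fun s x => PySem.List.pySetD s ((y : Nat) : Int)
          (PySem.List.pySetD (PySem.List.pyGetD s ((y : Nat) : Int) []) ((x : Nat) : Int) true)) s)
      screen).getD i []
      = if i < m then pvFillRow (screen.getD i []) aN else screen.getD i [] := by
  induction m with
  | zero => simp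
  | succ m ih =>
    obtain ⟨ihlen, ihget⟩ := ih (by omega)
    rw [List.range_succ, List.foldl_append, List.foldl_cons, List.foldl_nil]
    rw [pv_rect_inner _ m (by rw [ihlen]; omega) aN]
    constructor
    · rw [List.length_set, ihlen]
    · intro i
      rw [pv_getD_set, ihlen, ihget m, if_neg (show ¬ m < m by omega), ihget i]
      by_cases hi : i = m
      · subst hi
        rw [if_pos (show i = i ∧ i < screen.length from ⟨rfl, by omega⟩),
          if_pos (show i < i + 1 by omega)]
      · rw [if_neg (show ¬ (i = m ∧ i < screen.length) from fun h => hi h.1)]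
        by_cases him : i < m
        · rw [if_pos him, if_pos (show i < m + 1 by omega)]
        · rw [if_neg him, if_neg (show ¬ i < m + 1 by omega)]

-- A's column write-back loop, pointwise
lemma pv_col_fold (screen : List (List Bool)) (a W : Int) (hW : 0 < W)
    (hrows : ∀ r ∈ screen, r.length = W.toNat) (ha0 : -W ≤ a) (ha1 : a < W)
    (col2 : List Bool) (m : Nat) (hm : m ≤ screen.length) :
    ((List.range m).foldl
      (fun s y => PySem.List.pySetD s ((y : Nat) : Int)
        (PySem.List.pySetD (PySem.List.pyGetD s ((y : Nat) : Int) []) a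
          (PySem.List.pyGetD col2 ((y : Nat) : Int) false))) screen).length = screen.length ∧
    ∀ i : Nat, ((List.range m).foldl
      (fun s y => PySem.List.pySetD s ((y : Nat) : Int)
        (PySem.List.pySetD (PySem.List.pyGetD s ((y : Nat) : Int) []) a
          (PySem.List.pyGetD col2 ((y : Nat) : Int) false))) screen).getD i []
      = if i < m then
          (screen.getD i []).set (PySem.Int.mod a W).toNat (col2.getD i false)
        else screen.getD i [] := by
  induction m with
  | zero => simp
  | succ m ih =>
    obtain ⟨ihlen, ihget⟩ := ih (by omega)
    rw [List.range_succ, List.foldl_append, List.foldl_cons, List.foldl_nil]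
    have hmlt : m < screen.length := by omega
    have hrowm : (screen.getD m []).length = W.toNat := by
      rw [List.getD_eq_getElem _ _ hmlt]
      exact hrows _ (List.getElem_mem hmlt)
    rw [PySem.List.pyGetD_natCast, PySem.List.pyGetD_natCast, PySem.List.pySetD_natCast,
      ihget m, if_neg (by omega)]
    rw [pv_pySetD_in _ a _ (by rw [hrowm]; omega) (by rw [hrowm]; omega)]
    have hWcast : ((screen.getD m []).length : Int) = W := by rw [hrowm]; omega
    rw [hWcast]
    constructor
    · rw [List.length_set, ihlen]
    · intro i
      rw [pv_getD_set, ihlen, ihget i]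
      by_cases hi : i = m
      · subst hi
        rw [if_pos (show i = i ∧ i < screen.length from ⟨rfl, by omega⟩),
          if_pos (show i < i + 1 by omega)]
      · rw [if_neg (show ¬ (i = m ∧ i < screen.length) from fun h => hi h.1)]
        by_cases him : i < m
        · rw [if_pos him, if_pos (show i < m + 1 by omega)]
        · rw [if_neg him, if_neg (show ¬ i < m + 1 by omega)]

lemma pv_getDrow_len (W : Int) (screen : List (List Bool))
    (hrows : ∀ r ∈ screen, r.length = W.toNat) (i : Nat) (hi : i < screen.length) :
    (screen.getD i []).length = W.toNat := by
  rw [List.getD_eq_getElem _ _ hi]; exact hrows _ (List.getElem_mem hi)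

lemma pv_stepA (W H : Int) (screen : List (List Bool)) (F : Int → Int → Bool)
    (c : String × (Int × Int)) (hP : pvPreC W H c) (h : pvARel W H screen F) :
    pvARel W H (applyStepA W H screen c) (pvStepF W H F c) := by
  obtain ⟨hlen, hrows, hcont⟩ := h
  obtain ⟨hPrect, hProw, hPcol⟩ := hP
  rcases c with ⟨k, a, b⟩
  simp only at hPrect hProw hPcol
  by_cases hk : k = "rect"
  · -- rect a b
    subst hk
    have hPr := hPrect rfl
    simp only [applyStepA, pvStepF, beq_self_eq_true, if_true]
    rcases le_or_gt b 0 with hb0 | hb0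
    · rw [show PySem.List.pyRange 0 b 1 = [] from PySem.List.pyRange_one_eq_nil (by omega),
        List.foldl_nil]
      refine ⟨hlen, hrows, fun j i hj hi => ?_⟩
      dsimp only
      rw [if_neg (show ¬ ((j : Int) < a ∧ (i : Int) < b) by omega)]
      exact hcont j i hj hi
    · rcases le_or_gt a 0 with ha0 | ha0
      · have hfun : (fun (s : List (List Bool)) (y : Int) =>
            (PySem.List.pyRange 0 a 1).foldl
              (fun s x => PySem.List.pySetD s y
                (PySem.List.pySetD (PySem.List.pyGetD s y []) x true)) s)
            = fun s _ => s := by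
          funext s y
          rw [PySem.List.pyRange_one_eq_nil (by omega), List.foldl_nil]
        rw [hfun, PySem.List.foldl_ignore]
        refine ⟨hlen, hrows, fun j i hj hi => ?_⟩
        dsimp only
        rw [if_neg (show ¬ ((j : Int) < a ∧ (i : Int) < b) by omega)]
        exact hcont j i hj hi
      · obtain ⟨haW, hbH⟩ := hPr ⟨ha0, hb0⟩
        simp only [PySem.List.pyRange_zero, List.foldl_map]
        obtain ⟨Rlen, Rget⟩ := pv_rect_outer screen a.toNat b.toNat (by omega)
        refine ⟨by rw [Rlen, hlen], ?_, ?_⟩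
        · intro r hr
          rw [List.mem_iff_getElem] at hr
          obtain ⟨i, hi, hri⟩ := hr
          rw [← List.getD_eq_getElem _ [] hi, Rget i] at hri
          have hisc : i < screen.length := by rw [← Rlen]; exact hi
          by_cases him : i < b.toNat
          · rw [if_pos him] at hri
            rw [← hri, pvFillRow_length]
            exact pv_getDrow_len W screen hrows i hisc
          · rw [if_neg him] at hri
            rw [← hri]
            exact pv_getDrow_len W screen hrows i hisc
        · intro j i hj hi
          dsimp only
          rw [Rget i]
          by_cases him : i < b.toNat
          · rw [if_pos him,
              pvFillRow_getD _ _ (by rw [pv_getDrow_len W screen hrows i (by omega)]; omega) j]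
            by_cases hja : j < a.toNat
            · rw [if_pos hja, if_pos (show (j : Int) < a ∧ (i : Int) < b by omega)]
            · rw [if_neg hja, if_neg (show ¬ ((j : Int) < a ∧ (i : Int) < b) by omega)]
              exact hcont j i hj hi
          · rw [if_neg him, if_neg (show ¬ ((j : Int) < a ∧ (i : Int) < b) by omega)]
            exact hcont j i hj hi
  · by_cases hk2 : k = "row"
    · -- row a b
      subst hk2
      obtain ⟨hW0, hH, ha0, ha1⟩ := hProw rfl
      simp only [applyStepA, pvStepF, show (("row" : String) == "rect") = false from rfl,
        show (("row" : String) == "row") = true from rfl, Bool.false_eq_true, if_false, if_true]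
      have hcastH : (screen.length : Int) = H := by rw [hlen]; omega
      have hyN0 : 0 ≤ PySem.Int.mod a H := PySem.Int.mod_nonneg a hH
      have hyN1 : PySem.Int.mod a H < H := PySem.Int.mod_lt a hH
      rw [pv_pyGetD_in screen a [] (by omega) (by omega),
        pv_pySetD_in screen a _ (by omega) (by omega), hcastH]
      set yN := (PySem.Int.mod a H).toNat with hyNdef
      set row := screen.getD yN [] with hrowdef
      have hyNlt : yN < screen.length := by omega
      have hrowlen : row.length = W.toNat := pv_getDrow_len W screen hrows yN hyNlt
      rcases lt_or_gt_of_ne hW0 with hWneg | hWpos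
      · -- width < 0: every row is empty, the command is a no-op on empty rows
        have hrownil : row = [] := List.eq_nil_of_length_eq_zero (by omega)
        refine ⟨by rw [List.length_set, hlen], ?_, fun j i hj hi => by omega⟩
        intro r hr
        rcases List.mem_or_eq_of_mem_set hr with hr' | hr'
        · exact hrows r hr'
        · rw [hr', hrownil, pv_rot_nil]
          simp only [List.length_nil]
          omega
      · -- width > 0: genuine rotation of row yN
        have hs0 : 0 ≤ PySem.Int.mod b W := PySem.Int.mod_nonneg b hWpos
        have hs1 : PySem.Int.mod b W < W := PySem.Int.mod_lt b hWpos
        refine ⟨by rw [List.length_set, hlen], ?_, ?_⟩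
        · intro r hr
          rcases List.mem_or_eq_of_mem_set hr with hr' | hr'
          · exact hrows r hr'
          · rw [hr', pv_rot_length _ _ hs0 (by omega), hrowlen]
        · intro j i hj hi
          dsimp only
          rw [pv_getD_set] -- outer getD over the updated screen
          by_cases hiy : i = yN
          · subst hiy
            rw [if_pos (show yN = yN ∧ yN < screen.length from ⟨rfl, by omega⟩),
              pv_rot_getD row W hWpos hrowlen _ hs0 hs1 j hj,
              if_pos (show (yN : Int) = PySem.Int.mod a H by omega)]
            have hm0 : 0 ≤ PySem.Int.mod ((j : Int) - PySem.Int.mod b W) W :=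
              PySem.Int.mod_nonneg _ hWpos
            have hm1 : PySem.Int.mod ((j : Int) - PySem.Int.mod b W) W < W :=
              PySem.Int.mod_lt _ hWpos
            have := hcont (PySem.Int.mod ((j : Int) - PySem.Int.mod b W) W).toNat yN
              (by omega) (by omega)
            rw [hrowdef, this]
            congr 1
            omega
          · rw [if_neg (fun hcc => hiy hcc.1),
              if_neg (show ¬ ((i : Int) = PySem.Int.mod a H) by
                intro hcc; exact hiy (by omega))]
            exact hcont j i hj hi
    · by_cases hk3 : k = "col"
      · -- col a b
        subst hk3
        obtain ⟨hH0, hW0, hcolP⟩ := hPcol rfl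
        simp only [applyStepA, pvStepF, show (("col" : String) == "rect") = false from rfl,
          show (("col" : String) == "row") = false from rfl,
          show (("col" : String) == "col") = true from rfl, Bool.false_eq_true, if_false, if_true]
        rcases lt_or_gt_of_ne hH0 with hHneg | hHpos
        · -- height < 0: the loops over range(height) are empty
          simp only [show PySem.List.pyRange 0 H 1 = [] from PySem.List.pyRange_one_eq_nil (by omega),
            List.foldl_nil]
          refine ⟨hlen, hrows, fun j i hj hi => by omega⟩
        · obtain ⟨hWpos, ha0, ha1⟩ := hcolP hHpos
          have hcastH : (screen.length : Int) = H := by rw [hlen]; omega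
          have hxN0 : 0 ≤ PySem.Int.mod a W := PySem.Int.mod_nonneg a hWpos
          have hxN1 : PySem.Int.mod a W < W := PySem.Int.mod_lt a hWpos
          have hs0 : 0 ≤ PySem.Int.mod b H := PySem.Int.mod_nonneg b hHpos
          have hs1 : PySem.Int.mod b H < H := PySem.Int.mod_lt b hHpos
          -- the column as read before the write-back
          set column := (PySem.List.pyRange 0 H 1).map
            (fun y => PySem.List.pyGetD (PySem.List.pyGetD screen y []) a false) with hcoldef
          have hclen : column.length = H.toNat := by
            rw [hcoldef, List.length_map, PySem.List.length_pyRange_one]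
            omega
          have hcget : ∀ i : Nat, i < H.toNat →
              column.getD i false
                = F ((PySem.Int.mod a W).toNat : Int) (i : Int) := by
            intro i hi
            rw [hcoldef, List.getD_eq_getElem _ _ (by rw [List.length_map, PySem.List.length_pyRange_one]; omega),
              List.getElem_map, PySem.List.getElem_pyRange_one 0 H i
                (by rw [PySem.List.length_pyRange_one]; omega), zero_add]
            rw [PySem.List.pyGetD_natCast]
            have hisc : i < screen.length := by omega
            rw [pv_pyGetD_in (screen.getD i []) a false
                (by rw [pv_getDrow_len W screen hrows i hisc]; omega)
                (by rw [pv_getDrow_len W screen hrows i hisc]; omega)]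
            have hc2 : ((screen.getD i []).length : Int) = W := by
              rw [pv_getDrow_len W screen hrows i hisc]; omega
            rw [hc2]
            exact hcont (PySem.Int.mod a W).toNat i (by omega) hi
          set col2 := PySem.List.slice column (some (-(PySem.Int.mod b H))) none ++
            PySem.List.slice column none (some (-(PySem.Int.mod b H))) with hcol2def
          have hc2get : ∀ i : Nat, i < H.toNat →
              col2.getD i false
                = F ((PySem.Int.mod a W).toNat : Int)
                    (PySem.Int.mod ((i : Int) - PySem.Int.mod b H) H) := by
            intro i hi
            rw [hcol2def, pv_rot_getD column H hHpos hclen _ hs0 hs1 i hi]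
            have hm0 : 0 ≤ PySem.Int.mod ((i : Int) - PySem.Int.mod b H) H :=
              PySem.Int.mod_nonneg _ hHpos
            have hm1 : PySem.Int.mod ((i : Int) - PySem.Int.mod b H) H < H :=
              PySem.Int.mod_lt _ hHpos
            rw [hcget (PySem.Int.mod ((i : Int) - PySem.Int.mod b H) H).toNat (by omega)]
            congr 1
            omega
          -- the write-back loop
          simp only [PySem.List.pyRange_zero, List.foldl_map]
          obtain ⟨Rlen, Rget⟩ := pv_col_fold screen a W hWpos hrows (by omega) (by omega)
            col2 H.toNat (by omega)
          refine ⟨by rw [Rlen, hlen], ?_, ?_⟩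
          · intro r hr
            rw [List.mem_iff_getElem] at hr
            obtain ⟨i, hi, hri⟩ := hr
            rw [← List.getD_eq_getElem _ [] hi, Rget i] at hri
            have hisc : i < screen.length := by rw [← Rlen]; exact hi
            by_cases him : i < H.toNat
            · rw [if_pos him] at hri
              rw [← hri, List.length_set]
              exact pv_getDrow_len W screen hrows i hisc
            · rw [if_neg him] at hri
              rw [← hri]
              exact pv_getDrow_len W screen hrows i hisc
          · intro j i hj hi
            dsimp only
            rw [Rget i, if_pos hi, pv_getD_set, pv_getDrow_len W screen hrows i (by omega)]
            by_cases hjx : j = (PySem.Int.mod a W).toNat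
            · subst hjx
              rw [if_pos ⟨rfl, by omega⟩, hc2get i hi,
                if_pos (show (((PySem.Int.mod a W).toNat : Nat) : Int) = PySem.Int.mod a W by omega)]
            · rw [if_neg (fun hcc => hjx hcc.1),
                if_neg (show ¬ ((j : Int) = PySem.Int.mod a W) by omega)]
              exact hcont j i hj hi
      · -- unrecognised command: both sides unchanged
        simp only [applyStepA, pvStepF,
          beq_eq_false_iff_ne.mpr hk, beq_eq_false_iff_ne.mpr hk2, beq_eq_false_iff_ne.mpr hk3,
          Bool.false_eq_true, if_false]
        exact ⟨hlen, hrows, hcont⟩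

lemma pv_stepB (W H : Int) (lit : List (Int × Int)) (F : Int → Int → Bool)
    (c : String × (Int × Int)) (hP : pvPreC W H c) (h : pvBRel W H lit F) :
    pvBRel W H (applyStepB W H lit c) (pvStepF W H F c) := by
  obtain ⟨hrng, hcont⟩ := h
  obtain ⟨hPrect, hProw, hPcol⟩ := hP
  rcases c with ⟨k, a, b⟩
  simp only at hPrect hProw hPcol
  by_cases hk : k = "rect"
  · -- rect a b : union with the block of new pixels
    subst hk
    have hPr := hPrect rfl
    simp only [applyStepB, pvStepF, beq_self_eq_true, if_true]
    have hpairs : ∀ q : Int × Int,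
        q ∈ (PySem.List.pyRange 0 b 1).flatMap
            (fun y => (PySem.List.pyRange 0 a 1).map (fun x => (x, y)))
          ↔ (0 ≤ q.1 ∧ q.1 < a ∧ 0 ≤ q.2 ∧ q.2 < b) := by
      intro q
      rw [List.mem_flatMap]
      constructor
      · rintro ⟨y, hy, hq⟩
        rw [List.mem_map] at hq
        obtain ⟨x, hx, rfl⟩ := hq
        rw [PySem.List.mem_pyRange_one] at hy hx
        exact ⟨hx.1, hx.2, hy.1, hy.2⟩
      · rintro ⟨h1, h2, h3, h4⟩
        refine ⟨q.2, PySem.List.mem_pyRange_one.mpr ⟨h3, h4⟩, ?_⟩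
        rw [List.mem_map]
        exact ⟨q.1, PySem.List.mem_pyRange_one.mpr ⟨h1, h2⟩, rfl⟩
    constructor
    · intro p hp
      rw [PySem.Set.mem_union] at hp
      rcases hp with hp | hp
      · exact hrng p hp
      · obtain ⟨h1, h2, h3, h4⟩ := (hpairs p).1 hp
        obtain ⟨haW, hbH⟩ := hPr ⟨by omega, by omega⟩
        exact ⟨h1, by omega, h3, by omega⟩
    · intro j i hj hi
      dsimp only
      by_cases hcb : (j : Int) < a ∧ (i : Int) < b
      · rw [if_pos hcb]
        have hmem : (((j : Int), (i : Int)) ∈ PySem.Set.union lit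
            ((PySem.List.pyRange 0 b 1).flatMap
              (fun y => (PySem.List.pyRange 0 a 1).map (fun x => (x, y))))) :=
          (PySem.Set.mem_union _ _ _).2 (Or.inr ((hpairs _).2 ⟨by omega, hcb.1, by omega, hcb.2⟩))
        simp [hmem]
      · rw [if_neg hcb]
        have hnp : (((j : Int), (i : Int)) ∉ (PySem.List.pyRange 0 b 1).flatMap
            (fun y => (PySem.List.pyRange 0 a 1).map (fun x => (x, y)))) := by
          intro hmem
          obtain ⟨h1, h2, h3, h4⟩ := (hpairs _).1 hmem
          exact hcb ⟨by omega, by omega⟩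
        have hiff : (((j : Int), (i : Int)) ∈ PySem.Set.union lit
            ((PySem.List.pyRange 0 b 1).flatMap
              (fun y => (PySem.List.pyRange 0 a 1).map (fun x => (x, y)))))
            ↔ ((( j : Int), (i : Int)) ∈ lit) := by
          rw [PySem.Set.mem_union]
          exact or_iff_left hnp
        rw [decide_eq_decide.mpr hiff]
        exact hcont j i hj hi
  · by_cases hk2 : k = "row"
    · -- row a b : rotate the coordinates with y = a % height
      subst hk2
      obtain ⟨hW0, hH, ha0, ha1⟩ := hProw rfl
      simp only [applyStepB, pvStepF, show (("row" : String) == "rect") = false from rfl,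
        show (("row" : String) == "row") = true from rfl, Bool.false_eq_true, if_false, if_true]
      constructor
      · intro p hp
        rw [PySem.Set.mem_ofList, List.mem_map] at hp
        obtain ⟨q, hq, rfl⟩ := hp
        have hqr := hrng q hq
        have hWpos : 0 < W := by omega
        by_cases hq2 : (q.2 == PySem.Int.mod a H) = true
        · rw [if_pos hq2]
          exact ⟨PySem.Int.mod_nonneg _ hWpos, PySem.Int.mod_lt _ hWpos, hqr.2.2.1, hqr.2.2.2⟩
        · rw [if_neg hq2]
          exact hqr
      · intro j i hj hi
        dsimp only
        have hWpos : 0 < W := by omega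
        by_cases hiy : (i : Int) = PySem.Int.mod a H
        · rw [if_pos hiy]
          have hm0 : 0 ≤ PySem.Int.mod ((j : Int) - PySem.Int.mod b W) W :=
            PySem.Int.mod_nonneg _ hWpos
          have hm1 : PySem.Int.mod ((j : Int) - PySem.Int.mod b W) W < W :=
            PySem.Int.mod_lt _ hWpos
          have hmem : (((j : Int), (i : Int)) ∈ PySem.Set.ofList (lit.map
              (fun p => if p.2 == PySem.Int.mod a H
                then (PySem.Int.mod (p.1 + PySem.Int.mod b W) W, p.2) else p)))
              ↔ ((PySem.Int.mod ((j : Int) - PySem.Int.mod b W) W, (i : Int)) ∈ lit) := by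
            rw [PySem.Set.mem_ofList, List.mem_map]
            constructor
            · rintro ⟨q, hq, hfq⟩
              by_cases hq2 : (q.2 == PySem.Int.mod a H) = true
              · rw [if_pos hq2] at hfq
                have h1 : PySem.Int.mod (q.1 + PySem.Int.mod b W) W = (j : Int) :=
                  congrArg Prod.fst hfq
                have h2 : q.2 = (i : Int) := congrArg Prod.snd hfq
                have hqr := hrng q hq
                have hq1 : q.1 = PySem.Int.mod ((j : Int) - PySem.Int.mod b W) W :=
                  (pv_mod_shift_iff hWpos hqr.1 hqr.2.1 (by omega) (by omega)).1 h1
                have hqeq : q = (PySem.Int.mod ((j : Int) - PySem.Int.mod b W) W, (i : Int)) :=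
                  Prod.ext hq1 h2
                rw [← hqeq]
                exact hq
              · rw [if_neg hq2] at hfq
                exfalso
                apply hq2
                have h2 : q.2 = (i : Int) := congrArg Prod.snd hfq
                exact beq_iff_eq.mpr (by rw [h2, hiy])
            · intro hmem
              refine ⟨(PySem.Int.mod ((j : Int) - PySem.Int.mod b W) W, (i : Int)), hmem, ?_⟩
              rw [if_pos (beq_iff_eq.mpr hiy)]
              have hj1 : PySem.Int.mod (PySem.Int.mod ((j : Int) - PySem.Int.mod b W) W
                  + PySem.Int.mod b W) W = (j : Int) :=
                (pv_mod_shift_iff hWpos hm0 hm1 (by omega) (by omega)).2 rfl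
              exact Prod.ext hj1 rfl
          have hc := hcont (PySem.Int.mod ((j : Int) - PySem.Int.mod b W) W).toNat i
            (by omega) hi
          have hcast : (((PySem.Int.mod ((j : Int) - PySem.Int.mod b W) W).toNat : Nat) : Int)
              = PySem.Int.mod ((j : Int) - PySem.Int.mod b W) W := by omega
          simp only [hcast] at hc
          rw [decide_eq_decide.mpr hmem]
          exact hc
        · rw [if_neg hiy]
          have hmem : (((j : Int), (i : Int)) ∈ PySem.Set.ofList (lit.map
              (fun p => if p.2 == PySem.Int.mod a H
                then (PySem.Int.mod (p.1 + PySem.Int.mod b W) W, p.2) else p)))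
              ↔ (((j : Int), (i : Int)) ∈ lit) := by
            rw [PySem.Set.mem_ofList, List.mem_map]
            constructor
            · rintro ⟨q, hq, hfq⟩
              by_cases hq2 : (q.2 == PySem.Int.mod a H) = true
              · rw [if_pos hq2] at hfq
                exfalso
                have h2 : q.2 = (i : Int) := congrArg Prod.snd hfq
                exact hiy (by rw [← h2]; exact beq_iff_eq.mp hq2)
              · rw [if_neg hq2] at hfq
                rw [← hfq]
                exact hq
            · intro hmem
              refine ⟨((j : Int), (i : Int)), hmem, ?_⟩
              rw [if_neg (fun hb => hiy (beq_iff_eq.mp hb))]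
          rw [decide_eq_decide.mpr hmem]
          exact hcont j i hj hi
    · by_cases hk3 : k = "col"
      · -- col a b : rotate the coordinates with x = a % width
        subst hk3
        obtain ⟨hH0, hW0, hcolP⟩ := hPcol rfl
        simp only [applyStepB, pvStepF, show (("col" : String) == "rect") = false from rfl,
          show (("col" : String) == "row") = false from rfl,
          show (("col" : String) == "col") = true from rfl, Bool.false_eq_true, if_false, if_true]
        constructor
        · intro p hp
          rw [PySem.Set.mem_ofList, List.mem_map] at hp
          obtain ⟨q, hq, rfl⟩ := hp
          have hqr := hrng q hq
          have hHpos : 0 < H := by omega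
          by_cases hq2 : (q.1 == PySem.Int.mod a W) = true
          · rw [if_pos hq2]
            exact ⟨hqr.1, hqr.2.1, PySem.Int.mod_nonneg _ hHpos, PySem.Int.mod_lt _ hHpos⟩
          · rw [if_neg hq2]
            exact hqr
        · intro j i hj hi
          dsimp only
          have hHpos : 0 < H := by omega
          by_cases hjx : (j : Int) = PySem.Int.mod a W
          · rw [if_pos hjx]
            have hm0 : 0 ≤ PySem.Int.mod ((i : Int) - PySem.Int.mod b H) H :=
              PySem.Int.mod_nonneg _ hHpos
            have hm1 : PySem.Int.mod ((i : Int) - PySem.Int.mod b H) H < H :=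
              PySem.Int.mod_lt _ hHpos
            have hmem : (((j : Int), (i : Int)) ∈ PySem.Set.ofList (lit.map
                (fun p => if p.1 == PySem.Int.mod a W
                  then (p.1, PySem.Int.mod (p.2 + PySem.Int.mod b H) H) else p)))
                ↔ (((j : Int), PySem.Int.mod ((i : Int) - PySem.Int.mod b H) H) ∈ lit) := by
              rw [PySem.Set.mem_ofList, List.mem_map]
              constructor
              · rintro ⟨q, hq, hfq⟩
                by_cases hq2 : (q.1 == PySem.Int.mod a W) = true
                · rw [if_pos hq2] at hfq
                  have h1 : q.1 = (j : Int) := congrArg Prod.fst hfq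
                  have h2 : PySem.Int.mod (q.2 + PySem.Int.mod b H) H = (i : Int) :=
                    congrArg Prod.snd hfq
                  have hqr := hrng q hq
                  have hq1 : q.2 = PySem.Int.mod ((i : Int) - PySem.Int.mod b H) H :=
                    (pv_mod_shift_iff hHpos hqr.2.2.1 hqr.2.2.2 (by omega) (by omega)).1 h2
                  have hqeq : q = ((j : Int), PySem.Int.mod ((i : Int) - PySem.Int.mod b H) H) :=
                    Prod.ext h1 hq1
                  rw [← hqeq]
                  exact hq
                · rw [if_neg hq2] at hfq
                  exfalso
                  apply hq2
                  have h1 : q.1 = (j : Int) := congrArg Prod.fst hfq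
                  exact beq_iff_eq.mpr (by rw [h1, hjx])
              · intro hmem
                refine ⟨((j : Int), PySem.Int.mod ((i : Int) - PySem.Int.mod b H) H), hmem, ?_⟩
                rw [if_pos (beq_iff_eq.mpr hjx)]
                have hi1 : PySem.Int.mod (PySem.Int.mod ((i : Int) - PySem.Int.mod b H) H
                    + PySem.Int.mod b H) H = (i : Int) :=
                  (pv_mod_shift_iff hHpos hm0 hm1 (by omega) (by omega)).2 rfl
                exact Prod.ext rfl hi1
            have hc := hcont j (PySem.Int.mod ((i : Int) - PySem.Int.mod b H) H).toNat
              hj (by omega)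
            have hcast : (((PySem.Int.mod ((i : Int) - PySem.Int.mod b H) H).toNat : Nat) : Int)
                = PySem.Int.mod ((i : Int) - PySem.Int.mod b H) H := by omega
            simp only [hcast] at hc
            rw [decide_eq_decide.mpr hmem]
            exact hc
          · rw [if_neg hjx]
            have hmem : (((j : Int), (i : Int)) ∈ PySem.Set.ofList (lit.map
                (fun p => if p.1 == PySem.Int.mod a W
                  then (p.1, PySem.Int.mod (p.2 + PySem.Int.mod b H) H) else p)))
                ↔ (((j : Int), (i : Int)) ∈ lit) := by
              rw [PySem.Set.mem_ofList, List.mem_map]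
              constructor
              · rintro ⟨q, hq, hfq⟩
                by_cases hq2 : (q.1 == PySem.Int.mod a W) = true
                · rw [if_pos hq2] at hfq
                  exfalso
                  have h1 : q.1 = (j : Int) := congrArg Prod.fst hfq
                  exact hjx (by rw [← h1]; exact beq_iff_eq.mp hq2)
                · rw [if_neg hq2] at hfq
                  rw [← hfq]
                  exact hq
              · intro hmem
                refine ⟨((j : Int), (i : Int)), hmem, ?_⟩
                rw [if_neg (fun hb => hjx (beq_iff_eq.mp hb))]
            rw [decide_eq_decide.mpr hmem]
            exact hcont j i hj hi
      · -- unrecognised command: both sides unchanged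
        simp only [applyStepB, pvStepF,
          beq_eq_false_iff_ne.mpr hk, beq_eq_false_iff_ne.mpr hk2, beq_eq_false_iff_ne.mpr hk3,
          Bool.false_eq_true, if_false]
        exact ⟨hrng, hcont⟩

lemma pv_fold (W H : Int) (cs : List (String × (Int × Int)))
    (screen : List (List Bool)) (lit : PySem.Set (Int × Int)) (F : Int → Int → Bool)
    (hA : pvARel W H screen F) (hB : pvBRel W H lit F)
    (hP : ∀ c ∈ cs, pvPreC W H c) :
    pvARel W H (cs.foldl (applyStepA W H) screen) (cs.foldl (pvStepF W H) F) ∧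
    pvBRel W H (cs.foldl (applyStepB W H) lit) (cs.foldl (pvStepF W H) F) := by
  induction cs generalizing screen lit F with
  | nil => exact ⟨hA, hB⟩
  | cons c cs ih =>
    simp only [List.foldl_cons]
    exact ih _ _ _
      (pv_stepA W H screen F c (hP c List.mem_cons_self) hA)
      (pv_stepB W H lit F c (hP c List.mem_cons_self) hB)
      (fun c' hc' => hP c' (List.mem_cons_of_mem _ hc'))

lemma pv_init_A (W H : Int) :
    pvARel W H
      ((PySem.List.pyRange 0 H 1).map (fun _ => (PySem.List.pyRange 0 W 1).map (fun _ => false)))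
      (fun _ _ => false) := by
  refine ⟨?_, ?_, ?_⟩
  · rw [List.length_map, PySem.List.length_pyRange_one]
    omega
  · intro r hr
    rw [List.mem_map] at hr
    obtain ⟨y, hy, rfl⟩ := hr
    rw [List.length_map, PySem.List.length_pyRange_one]
    omega
  · intro j i hj hi
    have hi' : i < ((PySem.List.pyRange 0 H 1).map
        (fun _ => (PySem.List.pyRange 0 W 1).map (fun _ => false))).length := by
      rw [List.length_map, PySem.List.length_pyRange_one]; omega
    rw [List.getD_eq_getElem _ _ hi', List.getElem_map]
    rw [List.getD_eq_getElem _ _ (by rw [List.length_map, PySem.List.length_pyRange_one]; omega),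
      List.getElem_map]

lemma pv_init_B (W H : Int) : pvBRel W H PySem.Set.empty (fun _ _ => false) := by
  constructor
  · intro p hp
    simp at hp
  · intro j i hj hi
    simp

lemma pv_setbits (W H : Int) (lit : List (Int × Int))
    (hrng : ∀ p ∈ lit, 0 ≤ p.1 ∧ p.1 < W ∧ 0 ≤ p.2 ∧ p.2 < H)
    (g : List (List Bool)) (hlen : g.length = H.toNat) (hrows : ∀ r ∈ g, r.length = W.toNat) :
    (lit.foldl (fun s p =>
      PySem.List.pySetD s p.2 (PySem.List.pySetD (PySem.List.pyGetD s p.2 []) p.1 true)) g).length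
        = g.length ∧
    (∀ r ∈ lit.foldl (fun s p =>
      PySem.List.pySetD s p.2 (PySem.List.pySetD (PySem.List.pyGetD s p.2 []) p.1 true)) g,
        r.length = W.toNat) ∧
    ∀ j i : Nat, j < W.toNat → i < H.toNat →
      ((lit.foldl (fun s p =>
        PySem.List.pySetD s p.2 (PySem.List.pySetD (PySem.List.pyGetD s p.2 []) p.1 true)) g).getD i []).getD j false
        = if ((j : Int), (i : Int)) ∈ lit then true else (g.getD i []).getD j false := by
  induction lit generalizing g with
  | nil => exact ⟨rfl, hrows, fun j i hj hi => by simp⟩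
  | cons p lit ih =>
    obtain ⟨hp1, hp2, hp3, hp4⟩ := hrng p List.mem_cons_self
    have hplt : p.2.toNat < g.length := by omega
    have hrowp : (g.getD p.2.toNat []).length = W.toNat := pv_getDrow_len W g hrows _ hplt
    rw [List.foldl_cons,
      PySem.List.pyGetD_eq_getElem g [] hp3 (by omega),
      ← List.getD_eq_getElem g [] hplt,
      PySem.List.pySetD_of_nonneg _ _ hp3,
      PySem.List.pySetD_of_nonneg _ _ hp1]
    set g' := g.set p.2.toNat ((g.getD p.2.toNat []).set p.1.toNat true) with hg'
    have hg'len : g'.length = H.toNat := by rw [hg', List.length_set]; exact hlen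
    have hg'rows : ∀ r ∈ g', r.length = W.toNat := by
      intro r hr
      rcases List.mem_or_eq_of_mem_set hr with hr' | hr'
      · exact hrows r hr'
      · rw [hr', List.length_set]; exact hrowp
    obtain ⟨ihlen, ihrows, ihget⟩ := ih (fun q hq => hrng q (List.mem_cons_of_mem _ hq)) g' hg'len hg'rows
    refine ⟨by rw [ihlen, hg', List.length_set], ihrows, ?_⟩
    intro j i hj hi
    rw [ihget j i hj hi, hg', pv_getD_set]
    by_cases hmem : ((j : Int), (i : Int)) ∈ lit
    · rw [if_pos hmem, if_pos (List.mem_cons_of_mem _ hmem)]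
    · rw [if_neg hmem]
      by_cases hie : i = p.2.toNat
      · rw [if_pos ⟨hie, by omega⟩, pv_getD_set]
        by_cases hje : j = p.1.toNat
        · rw [if_pos ⟨hje, by rw [hrowp]; omega⟩, if_pos (by
            have hpe : ((j : Int), (i : Int)) = p := Prod.ext (by dsimp; omega) (by dsimp; omega)
            rw [hpe]
            exact List.mem_cons_self)]
        · rw [if_neg (fun hc => hje hc.1), if_neg (by
            intro hc
            rcases List.mem_cons.mp hc with h | h
            · exact hje (by have h1 := congrArg Prod.fst h; dsimp at h1; omega)
            · exact hmem h), hie]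
      · rw [if_neg (fun hc => hie hc.1), if_neg (by
          intro hc
          rcases List.mem_cons.mp hc with h | h
          · exact hie (by have h2 := congrArg Prod.snd h; dsimp at h2; omega)
          · exact hmem h)]

lemma pv_render (W H : Int) (screen : List (List Bool)) (lit : PySem.Set (Int × Int))
    (F : Int → Int → Bool) (hA : pvARel W H screen F) (hB : pvBRel W H lit F) :
    screen = lit.foldl (fun s p =>
        PySem.List.pySetD s p.2 (PySem.List.pySetD (PySem.List.pyGetD s p.2 []) p.1 true))
      ((PySem.List.pyRange 0 H 1).map (fun _ => PySem.List.pyRepeat [false] W)) := by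
  obtain ⟨hlen, hrows, hcont⟩ := hA
  obtain ⟨hrng, hbcont⟩ := hB
  have hg0len : ((PySem.List.pyRange 0 H 1).map
      (fun _ => PySem.List.pyRepeat [false] W)).length = H.toNat := by
    rw [List.length_map, PySem.List.length_pyRange_one]; omega
  have hg0rows : ∀ r ∈ (PySem.List.pyRange 0 H 1).map
      (fun _ => PySem.List.pyRepeat [false] W), r.length = W.toNat := by
    intro r hr
    rw [List.mem_map] at hr
    obtain ⟨y, hy, rfl⟩ := hr
    rw [PySem.List.pyRepeat_singleton, List.length_replicate]
  obtain ⟨Rlen, Rrows, Rget⟩ := pv_setbits W H lit hrng _ hg0len hg0rows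
  apply List.ext_getElem
  · rw [Rlen, hg0len, hlen]
  · intro i h1 h2
    have hiH : i < H.toNat := by rw [hlen] at h1; exact h1
    apply List.ext_getElem
    · rw [hrows _ (List.getElem_mem h1), Rrows _ (List.getElem_mem h2)]
    · intro j h3 h4
      have hjW : j < W.toNat := by rw [hrows _ (List.getElem_mem h1)] at h3; exact h3
      have hc := hcont j i hjW hiH
      rw [List.getD_eq_getElem _ _ h1, List.getD_eq_getElem _ _ h3] at hc
      have hR := Rget j i hjW hiH
      rw [List.getD_eq_getElem _ _ h2, List.getD_eq_getElem _ _ h4] at hR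
      rw [hc, hR]
      by_cases hmem : ((j : Int), (i : Int)) ∈ lit
      · rw [if_pos hmem, ← hbcont j i hjW hiH, decide_eq_true_eq.mpr hmem]
      · rw [if_neg hmem, ← hbcont j i hjW hiH,
          decide_eq_false_iff_not.mpr hmem]
        have hglt : i < ((PySem.List.pyRange 0 H 1).map
            (fun _ => PySem.List.pyRepeat [false] W)).length := by omega
        rw [List.getD_eq_getElem _ _ hglt, List.getElem_map, PySem.List.pyRepeat_singleton,
          List.getD_eq_getElem _ _ (by rw [List.length_replicate]; omega),
          List.getElem_replicate]

-- ===== VERDICT (by name: the statement is the Claim_ definition above) =====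
theorem apply_spec : Claim_equal_apply := by
  intro cs W H _ hPre
  simp only [Spec_apply, apply, apply_alt]
  obtain ⟨hA, hB⟩ := pv_fold W H cs _ _ _ (pv_init_A W H) (pv_init_B W H)
    (fun c hc => hPre c hc)
  exact pv_render W H _ _ _ hA hB
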